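-- pv_equiv track=rewrite | github.com/Afraz-M/cp-notebook | searching/collecting2.py | GFG
-- ===== SOURCE A (Python) =====
-- def GFG(n, m, values, swaps):
--     values.insert(0, 0)
--     res = []
--     position = [0] * (n + 1)
--     for i in range(1, n + 1):
--         position[values[i]] = i
--     count = 1
--     for i in range(1, n):
--         count += position[i] > position[i + 1]
--     updated_pairs = set()
--     for i in range(m):
--         l, r = swaps[i]
--         if values[l] + 1 <= n:
--             updated_pairs.add((values[l], values[l] + 1))
--         if values[l] - 1 >= 1:
--             updated_pairs.add((values[l] - 1, values[l]))
--         if values[r] + 1 <= n: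
--             updated_pairs.add((values[r], values[r] + 1))
--         if values[r] - 1 >= 1:
--             updated_pairs.add((values[r] - 1, values[r]))
--         for swapped in updated_pairs:
--             count -= position[swapped[0]] > position[swapped[1]]
--         values[l], values[r] = values[r], values[l]
--         position[values[l]] = l
--         position[values[r]] = r
--         for swapped in updated_pairs:
--             count += position[swapped[0]] > position[swapped[1]]
--         res.append(count)
--         updated_pairs.clear()
--     return res
-- ===== SOURCE B (Python) =====
-- def GFG(n, m, values, swaps):
--     values.insert(0, 0)
--     position = [0] * (n + 1)
--     for i in range(1, n + 1):
--         position[values[i]] = i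
--     res = []
--     for i in range(m):
--         l, r = swaps[i]
--         values[l], values[r] = values[r], values[l]
--         position[values[l]] = l
--         position[values[r]] = r
--         res.append(1 + sum(position[j] > position[j + 1] for j in range(1, n)))
--     return res
-- ===== Notes on version B (the rewrite author's own statement) =====
-- stated objective: simpler
-- what changed: B drops A's incremental 4-pair delta maintenance of the inversion count (the updated_pairs set and the subtract/re-add passes) and instead recomputes the count from scratch after each swap by one linear scan of the position array.
-- outside the precondition, e.g. on GFG(2, 2, [2, 2], [(2, 0), (2, 1)]): A returns [2, 2], B returns [1, 1]; on GFG(4, 2, [3, -1, 0, -1], [(1, 2), (1, 3)]): A returns [1, 2], B returns [2, 1]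
import Mathlib
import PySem

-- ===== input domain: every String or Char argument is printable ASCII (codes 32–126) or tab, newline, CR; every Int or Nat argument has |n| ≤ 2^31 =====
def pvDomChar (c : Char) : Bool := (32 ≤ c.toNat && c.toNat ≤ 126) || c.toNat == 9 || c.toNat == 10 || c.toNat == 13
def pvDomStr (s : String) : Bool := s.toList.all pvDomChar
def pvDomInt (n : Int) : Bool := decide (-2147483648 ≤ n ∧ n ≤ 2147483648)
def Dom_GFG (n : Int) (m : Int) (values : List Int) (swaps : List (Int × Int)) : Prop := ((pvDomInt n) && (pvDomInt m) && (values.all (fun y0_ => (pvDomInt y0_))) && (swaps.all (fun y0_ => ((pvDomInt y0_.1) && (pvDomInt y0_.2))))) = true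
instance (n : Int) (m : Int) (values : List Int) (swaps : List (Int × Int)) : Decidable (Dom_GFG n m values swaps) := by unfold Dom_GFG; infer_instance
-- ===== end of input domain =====

-- B replaces A's incremental 4-pair delta maintenance of the inversion count by a full
-- linear rescan of the position array after each swap (objective: simpler, not faster).
-- Both A and B mutate `values` in place (insert of the 0 sentinel, swaps); the equivalence
-- proved here is about the RETURN value only.

-- ===== PORT A =====
-- 'if cond: updated_pairs.add(x)' — one conditional set-add
def pvCondAdd (c : Prop) [Decidable c] (s : PySem.Set (Int × Int)) (x : Int × Int) :
    PySem.Set (Int × Int) := if c then PySem.Set.add s x else s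

-- `updated_pairs` after the four conditional adds (values[l] / values[r] read BEFORE the
-- swap).  Python iterates the set in hash order; the port iterates it in insertion order —
-- the two folds in pvA_step only add/subtract one integer per element, so the count is the same.
def pvA_pairs (n vl vr : Int) : PySem.Set (Int × Int) :=
  pvCondAdd (1 ≤ vr - 1)
    (pvCondAdd (vr + 1 ≤ n)
      (pvCondAdd (1 ≤ vl - 1)
        (pvCondAdd (vl + 1 ≤ n) PySem.Set.empty (vl, vl + 1))
        (vl - 1, vl))
      (vr, vr + 1))
    (vr - 1, vr)

-- one iteration of A's main loop on state (values, position, count, res), with (l, r) = swaps[i]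
def pvA_step (n : Int) (st : List Int × List Int × Int × List Int) (lr : Int × Int) :
    List Int × List Int × Int × List Int :=
  let l := lr.1
  let r := lr.2
  let vl := PySem.List.pyGetD st.1 l 0
  let vr := PySem.List.pyGetD st.1 r 0
  let up := pvA_pairs n vl vr
  let count := up.foldl (fun c q =>
      c - (if PySem.List.pyGetD st.2.1 q.1 0 > PySem.List.pyGetD st.2.1 q.2 0 then (1:Int) else 0)) st.2.2.1
  let values := PySem.List.pySetD (PySem.List.pySetD st.1 l vr) r vl
  let position := PySem.List.pySetD st.2.1 (PySem.List.pyGetD values l 0) l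
  let position := PySem.List.pySetD position (PySem.List.pyGetD values r 0) r
  let count := up.foldl (fun c q =>
      c + (if PySem.List.pyGetD position q.1 0 > PySem.List.pyGetD position q.2 0 then (1:Int) else 0)) count
  (values, position, count, st.2.2.2 ++ [count])

def GFG (n : Int) (m : Int) (values : List Int) (swaps : List (Int × Int)) : List Int :=
  let values := PySem.List.insert values 0 0
  let position := (PySem.List.pyRange 1 (n + 1) 1).foldl
      (fun pos i => PySem.List.pySetD pos (PySem.List.pyGetD values i 0) i)
      (List.replicate (n + 1).toNat (0 : Int))
  let count := (PySem.List.pyRange 1 n 1).foldl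
      (fun c i => c + (if PySem.List.pyGetD position i 0 > PySem.List.pyGetD position (i + 1) 0
                       then (1:Int) else 0)) 1
  ((PySem.List.pyRange 0 m 1).foldl
      (fun st i => pvA_step n st (PySem.List.pyGetD swaps i (0, 0)))
      (values, position, count, [])).2.2.2

-- ===== PORT B =====
-- 1 + sum(position[j] > position[j+1] for j in range(1, n))
def pvB_count (n : Int) (position : List Int) : Int :=
  1 + ((PySem.List.pyRange 1 n 1).map
      (fun j => if PySem.List.pyGetD position j 0 > PySem.List.pyGetD position (j + 1) 0
                then (1:Int) else 0)).sum

-- one iteration of B's loop on state (values, position, res), with (l, r) = swaps[i]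
def pvB_step (n : Int) (st : List Int × List Int × List Int) (lr : Int × Int) :
    List Int × List Int × List Int :=
  let l := lr.1
  let r := lr.2
  let vl := PySem.List.pyGetD st.1 l 0
  let vr := PySem.List.pyGetD st.1 r 0
  let values := PySem.List.pySetD (PySem.List.pySetD st.1 l vr) r vl
  let position := PySem.List.pySetD st.2.1 (PySem.List.pyGetD values l 0) l
  let position := PySem.List.pySetD position (PySem.List.pyGetD values r 0) r
  (values, position, st.2.2 ++ [pvB_count n position])

def GFG_alt (n : Int) (m : Int) (values : List Int) (swaps : List (Int × Int)) : List Int :=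
  let values := PySem.List.insert values 0 0
  let position := (PySem.List.pyRange 1 (n + 1) 1).foldl
      (fun pos i => PySem.List.pySetD pos (PySem.List.pyGetD values i 0) i)
      (List.replicate (n + 1).toNat (0 : Int))
  ((PySem.List.pyRange 0 m 1).foldl
      (fun st i => pvB_step n st (PySem.List.pyGetD swaps i (0, 0)))
      (values, position, [])).2.2

-- ===== PRECONDITION & SPEC =====
-- Pre_ admits (a) every input whose swap loop never runs (m ≤ 0) as long as A's
-- initialisation does not raise, and (b) the function's natural domain: n ≥ 0 with exactly
-- n values all in 1..n, swap indices in 1..n and 0 ≤ m ≤ len(swaps).  Outside (a)/(b) A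
-- either raises (m > len(swaps), out-of-range position writes) or still returns on inputs
-- outside the problem it implements (swap index 0 touches the sentinel slot, out-of-range
-- values leave stale position slots), which are excluded as outside the natural domain.
def Pre_GFG (n : Int) (m : Int) (values : List Int) (swaps : List (Int × Int)) : Prop :=
  (n ≤ (values.length : Int) ∧ ∀ x ∈ values.take n.toNat, -(n + 1) ≤ x ∧ x ≤ n) ∧
  (m ≤ 0 ∨
    (0 ≤ n ∧ (values.length : Int) = n ∧ (∀ x ∈ values, 1 ≤ x ∧ x ≤ n) ∧
     0 ≤ m ∧ m ≤ (swaps.length : Int) ∧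
     (∀ q ∈ swaps.take m.toNat, 1 ≤ q.1 ∧ q.1 ≤ n ∧ 1 ≤ q.2 ∧ q.2 ≤ n)))
instance (n : Int) (m : Int) (values : List Int) (swaps : List (Int × Int)) : Decidable (Pre_GFG n m values swaps) := by unfold Pre_GFG; infer_instance

def pvWitness_GFG : Int × Int × List Int × (List (Int × Int)) := (3, 2, [2, 3, 1], [(1, 3), (2, 2)])

def Spec_GFG (n : Int) (m : Int) (values : List Int) (swaps : List (Int × Int)) (out : List Int) : Prop := out = GFG_alt n m values swaps
instance (n : Int) (m : Int) (values : List Int) (swaps : List (Int × Int)) (out : List Int) : Decidable (Spec_GFG n m values swaps out) := by unfold Spec_GFG; infer_instance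

-- ===== CLAIM =====
def Claim_equal_GFG : Prop := ∀ (n : Int) (m : Int) (values : List Int) (swaps : List (Int × Int)), Dom_GFG n m values swaps → Pre_GFG n m values swaps → Spec_GFG n m values swaps (GFG n m values swaps)

-- ===== LEMMAS AND PROOFS =====

-- the adjacent-inversion sum of a position array (B's rescan, without the leading 1)
def pvS (n : Int) (p : List Int) : Int :=
  ((PySem.List.pyRange 1 n 1).map
      (fun j => if PySem.List.pyGetD p j 0 > PySem.List.pyGetD p (j + 1) 0
                then (1:Int) else 0)).sum

-- loop invariant: array lengths, and values[1..n] all lie in 1..n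
def pvInv (n : Int) (v p : List Int) : Prop :=
  v.length = (n + 1).toNat ∧ p.length = (n + 1).toNat ∧
  ∀ k : Int, 1 ≤ k → k ≤ n → 1 ≤ PySem.List.pyGetD v k 0 ∧ PySem.List.pyGetD v k 0 ≤ n

theorem mem_pvCondAdd (c : Prop) [Decidable c] (s : PySem.Set (Int × Int)) (x y : Int × Int) :
    y ∈ pvCondAdd c s x ↔ y ∈ s ∨ (c ∧ y = x) := by
  unfold pvCondAdd
  split_ifs with h
  · rw [PySem.Set.mem_add]; tauto
  · tauto

theorem nodup_pvCondAdd (c : Prop) [Decidable c] (s : PySem.Set (Int × Int)) (x : Int × Int)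
    (hs : s.Nodup) : (pvCondAdd c s x).Nodup := by
  unfold pvCondAdd
  split_ifs with h
  · exact PySem.Set.nodup_add s x hs
  · exact hs

theorem mem_pvA_pairs (n vl vr : Int) (q : Int × Int) :
    q ∈ pvA_pairs n vl vr ↔
      (vl + 1 ≤ n ∧ q = (vl, vl + 1)) ∨ (1 ≤ vl - 1 ∧ q = (vl - 1, vl)) ∨
      (vr + 1 ≤ n ∧ q = (vr, vr + 1)) ∨ (1 ≤ vr - 1 ∧ q = (vr - 1, vr)) := by
  unfold pvA_pairs
  simp only [mem_pvCondAdd, PySem.Set.empty]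
  simp
  tauto

theorem nodup_pvA_pairs (n vl vr : Int) : (pvA_pairs n vl vr).Nodup := by
  unfold pvA_pairs
  apply nodup_pvCondAdd; apply nodup_pvCondAdd; apply nodup_pvCondAdd; apply nodup_pvCondAdd
  exact List.nodup_nil

theorem snd_pvA_pairs (n vl vr : Int) : ∀ q ∈ pvA_pairs n vl vr, q.2 = q.1 + 1 := by
  intro q hq
  rw [mem_pvA_pairs] at hq
  rcases hq with ⟨_, rfl⟩ | ⟨_, rfl⟩ | ⟨_, rfl⟩ | ⟨_, rfl⟩ <;> simp

theorem mem_fst_pvA_pairs (n vl vr i : Int) :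
    i ∈ (pvA_pairs n vl vr).map Prod.fst ↔
      (vl + 1 ≤ n ∧ i = vl) ∨ (1 ≤ vl - 1 ∧ i = vl - 1) ∨
      (vr + 1 ≤ n ∧ i = vr) ∨ (1 ≤ vr - 1 ∧ i = vr - 1) := by
  simp only [List.mem_map]
  constructor
  · rintro ⟨q, hq, rfl⟩
    rw [mem_pvA_pairs] at hq
    rcases hq with ⟨h, rfl⟩ | ⟨h, rfl⟩ | ⟨h, rfl⟩ | ⟨h, rfl⟩ <;> simp [h]
  · rintro (⟨h, he⟩ | ⟨h, he⟩ | ⟨h, he⟩ | ⟨h, he⟩)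
    · exact ⟨(vl, vl + 1), by rw [mem_pvA_pairs]; tauto, by simp [he]⟩
    · exact ⟨(vl - 1, vl), by rw [mem_pvA_pairs]; tauto, by simp [he]⟩
    · exact ⟨(vr, vr + 1), by rw [mem_pvA_pairs]; tauto, by simp [he]⟩
    · exact ⟨(vr - 1, vr), by rw [mem_pvA_pairs]; tauto, by simp [he]⟩

theorem nodup_fst_pvA_pairs (n vl vr : Int) : ((pvA_pairs n vl vr).map Prod.fst).Nodup := by
  refine List.Nodup.map_on ?_ (nodup_pvA_pairs n vl vr)
  intro x hx y hy hxy
  have hx2 := snd_pvA_pairs n vl vr x hx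
  have hy2 := snd_pvA_pairs n vl vr y hy
  have : x.2 = y.2 := by rw [hx2, hy2, hxy]
  exact Prod.ext hxy this

theorem pv_foldl_sub {α : Type} (l : List α) (g : α → Int) (a : Int) :
    l.foldl (fun c x => c - g x) a = a - (l.map g).sum := by
  induction l generalizing a with
  | nil => simp
  | cons x xs ih => simp only [List.foldl_cons, List.map_cons, List.sum_cons, ih]; ring

theorem pv_sum_map_sub (l : List Int) (f g : Int → Int) :
    (l.map (fun i => g i - f i)).sum = (l.map g).sum - (l.map f).sum := by
  induction l with
  | nil => simp
  | cons x xs ih => simp only [List.map_cons, List.sum_cons, ih]; ring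

-- a sum over range(1, n) changes only at the indices listed in D
theorem pv_sum_update (n : Int) (f g : Int → Int) (D : List Int) (hD : D.Nodup)
    (hmem : ∀ a ∈ D, a ∈ PySem.List.pyRange 1 n 1)
    (hout : ∀ i ∈ PySem.List.pyRange 1 n 1, i ∉ D → f i = g i) :
    ((PySem.List.pyRange 1 n 1).map g).sum
      = ((PySem.List.pyRange 1 n 1).map f).sum - (D.map f).sum + (D.map g).sum := by
  have hl : (PySem.List.pyRange 1 n 1).Nodup := PySem.List.nodup_pyRange_one 1 n
  have key : ((PySem.List.pyRange 1 n 1).map (fun i => g i - f i)).sum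
      = (D.map (fun i => g i - f i)).sum := by
    rw [← List.sum_toFinset _ hl, ← List.sum_toFinset _ hD]
    refine (Finset.sum_subset ?_ ?_).symm
    · intro a ha
      rw [List.mem_toFinset] at *
      exact hmem a ha
    · intro i hi hni
      rw [List.mem_toFinset] at hi
      rw [List.mem_toFinset] at hni
      have := hout i hi hni
      omega
  have h1 := pv_sum_map_sub (PySem.List.pyRange 1 n 1) f g
  have h2 := pv_sum_map_sub D f g
  omega

theorem pv_getD_setD_ne (p : List Int) (a i x : Int) (ha0 : 0 ≤ a)
    (hi0 : 0 ≤ i) (hne : i ≠ a) :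
    PySem.List.pyGetD (PySem.List.pySetD p a x) i 0 = PySem.List.pyGetD p i 0 := by
  rw [PySem.List.pySetD_of_nonneg p x ha0, PySem.List.pyGetD_of_nonneg _ _ hi0,
      PySem.List.pyGetD_of_nonneg _ _ hi0]
  rw [List.getD, List.getD, List.getElem?_set_ne]
  omega

theorem pv_getD_setD_self (p : List Int) (a x : Int) (ha0 : 0 ≤ a)
    (ha : a < (p.length : Int)) :
    PySem.List.pyGetD (PySem.List.pySetD p a x) a 0 = x := by
  rw [PySem.List.pySetD_of_nonneg p x ha0, PySem.List.pyGetD_of_nonneg _ _ ha0]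
  rw [List.getD, List.getElem?_set_self (by omega), Option.getD_some]

-- A's incremental count update equals B's rescan of the new position array
theorem pv_count_delta (n : Int) (p : List Int) (l r vl vr : Int)
    (_hp : p.length = (n + 1).toNat) (_hn : 0 ≤ n)
    (hvl : 1 ≤ vl ∧ vl ≤ n) (hvr : 1 ≤ vr ∧ vr ≤ n) :
    ((pvA_pairs n vl vr).foldl (fun c q =>
        c + (if PySem.List.pyGetD (PySem.List.pySetD (PySem.List.pySetD p vr l) vl r) q.1 0
               > PySem.List.pyGetD (PySem.List.pySetD (PySem.List.pySetD p vr l) vl r) q.2 0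
             then (1:Int) else 0))
      ((pvA_pairs n vl vr).foldl (fun c q =>
        c - (if PySem.List.pyGetD p q.1 0 > PySem.List.pyGetD p q.2 0 then (1:Int) else 0))
        (1 + pvS n p)))
    = 1 + pvS n (PySem.List.pySetD (PySem.List.pySetD p vr l) vl r) := by
  set p' := PySem.List.pySetD (PySem.List.pySetD p vr l) vl r with hp'
  set P := pvA_pairs n vl vr with hP
  set D := P.map Prod.fst with hDdef
  have hsnd := snd_pvA_pairs n vl vr
  rw [pv_foldl_sub, PySem.List.foldl_add]
  have hmapold : P.map (fun q => if PySem.List.pyGetD p q.1 0 > PySem.List.pyGetD p q.2 0 then (1:Int) else 0)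
      = D.map (fun a => if PySem.List.pyGetD p a 0 > PySem.List.pyGetD p (a + 1) 0 then (1:Int) else 0) := by
    rw [hDdef, List.map_map]
    refine List.map_congr_left ?_
    intro q hq
    simp only [Function.comp]
    rw [hsnd q hq]
  have hmapnew : P.map (fun q => if PySem.List.pyGetD p' q.1 0 > PySem.List.pyGetD p' q.2 0 then (1:Int) else 0)
      = D.map (fun a => if PySem.List.pyGetD p' a 0 > PySem.List.pyGetD p' (a + 1) 0 then (1:Int) else 0) := by
    rw [hDdef, List.map_map]
    refine List.map_congr_left ?_
    intro q hq
    simp only [Function.comp]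
    rw [hsnd q hq]
  rw [hmapold, hmapnew]
  have hupd := pv_sum_update n
      (fun a => if PySem.List.pyGetD p a 0 > PySem.List.pyGetD p (a + 1) 0 then (1:Int) else 0)
      (fun a => if PySem.List.pyGetD p' a 0 > PySem.List.pyGetD p' (a + 1) 0 then (1:Int) else 0)
      D (nodup_fst_pvA_pairs n vl vr)
      (by
        intro a ha
        rw [hDdef, mem_fst_pvA_pairs] at ha
        rw [PySem.List.mem_pyRange_one]
        rcases ha with ⟨h, rfl⟩ | ⟨h, rfl⟩ | ⟨h, rfl⟩ | ⟨h, rfl⟩ <;> omega)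
      (by
        intro i hi hni
        rw [PySem.List.mem_pyRange_one] at hi
        rw [hDdef, mem_fst_pvA_pairs] at hni
        simp only [not_or, not_and] at hni
        have hne : i ≠ vl ∧ i + 1 ≠ vl ∧ i ≠ vr ∧ i + 1 ≠ vr := by
          constructor
          · intro he; exact absurd he (hni.1 (by omega))
          constructor
          · intro he; exact absurd (by omega : i = vl - 1) (hni.2.1 (by omega))
          constructor
          · intro he; exact absurd he (hni.2.2.1 (by omega))
          · intro he; exact absurd (by omega : i = vr - 1) (hni.2.2.2 (by omega))
        have e1 : PySem.List.pyGetD p' i 0 = PySem.List.pyGetD p i 0 := by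
          rw [hp', pv_getD_setD_ne _ _ _ _ (by omega) (by omega) (by omega),
              pv_getD_setD_ne _ _ _ _ (by omega) (by omega) (by omega)]
        have e2 : PySem.List.pyGetD p' (i + 1) 0 = PySem.List.pyGetD p (i + 1) 0 := by
          rw [hp', pv_getD_setD_ne _ _ _ _ (by omega) (by omega) (by omega),
              pv_getD_setD_ne _ _ _ _ (by omega) (by omega) (by omega)]
        simp only [e1, e2])
  unfold pvS
  omega

theorem pv_step_eq (n : Int) (v p : List Int) (c : Int) (res : List Int) (lr : Int × Int)
    (hinv : pvInv n v p) (hn : 0 ≤ n) (hl : 1 ≤ lr.1 ∧ lr.1 ≤ n) (hr : 1 ≤ lr.2 ∧ lr.2 ≤ n)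
    (hc : c = 1 + pvS n p) :
    pvA_step n (v, p, c, res) lr
      = ((pvB_step n (v, p, res) lr).1, (pvB_step n (v, p, res) lr).2.1,
         pvB_count n (pvB_step n (v, p, res) lr).2.1, (pvB_step n (v, p, res) lr).2.2) := by
  obtain ⟨hvlen, hplen, hbnd⟩ := hinv
  obtain ⟨l, r⟩ := lr
  simp only at hl hr
  have hvlb := hbnd l hl.1 hl.2
  have hvrb := hbnd r hr.1 hr.2
  simp only [pvA_step, pvB_step, pvB_count]
  have hgr : PySem.List.pyGetD (PySem.List.pySetD (PySem.List.pySetD v l (PySem.List.pyGetD v r 0)) r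
      (PySem.List.pyGetD v l 0)) r 0 = PySem.List.pyGetD v l 0 := by
    rw [pv_getD_setD_self _ _ _ (by omega) (by simp [PySem.List.length_pySetD, hvlen]; omega)]
  have hgl : PySem.List.pyGetD (PySem.List.pySetD (PySem.List.pySetD v l (PySem.List.pyGetD v r 0)) r
      (PySem.List.pyGetD v l 0)) l 0 = PySem.List.pyGetD v r 0 := by
    by_cases hlr : l = r
    · subst hlr
      rw [pv_getD_setD_self _ _ _ (by omega) (by simp [PySem.List.length_pySetD, hvlen]; omega)]
    · rw [pv_getD_setD_ne _ _ _ _ (by omega) (by omega) hlr,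
          pv_getD_setD_self _ _ _ (by omega) (by simp [hvlen]; omega)]
  simp only [hgl, hgr]
  rw [hc, pv_count_delta n p l r (PySem.List.pyGetD v l 0) (PySem.List.pyGetD v r 0) hplen hn hvlb hvrb]
  rfl

theorem pv_step_inv (n : Int) (v p : List Int) (res : List Int) (lr : Int × Int)
    (hinv : pvInv n v p) (hn : 0 ≤ n) (hl : 1 ≤ lr.1 ∧ lr.1 ≤ n) (hr : 1 ≤ lr.2 ∧ lr.2 ≤ n) :
    pvInv n (pvB_step n (v, p, res) lr).1 (pvB_step n (v, p, res) lr).2.1 := by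
  obtain ⟨hvlen, hplen, hbnd⟩ := hinv
  obtain ⟨l, r⟩ := lr
  simp only at hl hr
  have hvlb := hbnd l hl.1 hl.2
  have hvrb := hbnd r hr.1 hr.2
  simp only [pvB_step]
  refine ⟨by simp [PySem.List.length_pySetD, hvlen], by simp [PySem.List.length_pySetD, hplen], ?_⟩
  intro k hk1 hk2
  by_cases hkr : k = r
  · rw [hkr, pv_getD_setD_self _ _ _ (by omega) (by simp [PySem.List.length_pySetD]; omega)]
    exact hvlb
  · rw [pv_getD_setD_ne _ _ _ _ (by omega) (by omega) hkr]
    by_cases hkl : k = l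
    · rw [hkl, pv_getD_setD_self _ _ _ (by omega) (by omega)]
      exact hvrb
    · rw [pv_getD_setD_ne _ _ _ _ (by omega) (by omega) hkl]
      exact hbnd k hk1 hk2

theorem pv_loop_eq (n : Int) (t : List (Int × Int)) (v p : List Int) (c : Int) (res : List Int)
    (hinv : pvInv n v p) (hn : 0 ≤ n)
    (ht : ∀ q ∈ t, 1 ≤ q.1 ∧ q.1 ≤ n ∧ 1 ≤ q.2 ∧ q.2 ≤ n)
    (hc : c = 1 + pvS n p) :
    (t.foldl (pvA_step n) (v, p, c, res)).2.2.2
      = (t.foldl (pvB_step n) (v, p, res)).2.2 := by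
  induction t generalizing v p c res with
  | nil => simp [hc]
  | cons q t ih =>
    have hq := ht q (List.mem_cons_self)
    simp only [List.foldl_cons]
    rw [pv_step_eq n v p c res q hinv hn ⟨hq.1, hq.2.1⟩ ⟨hq.2.2.1, hq.2.2.2⟩ hc]
    have hstep := pv_step_inv n v p res q hinv hn ⟨hq.1, hq.2.1⟩ ⟨hq.2.2.1, hq.2.2.2⟩
    have := ih (pvB_step n (v, p, res) q).1 (pvB_step n (v, p, res) q).2.1
        (pvB_count n (pvB_step n (v, p, res) q).2.1) (pvB_step n (v, p, res) q).2.2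
        hstep (fun x hx => ht x (List.mem_cons_of_mem q hx)) rfl
    exact this

-- ===== VERDICT =====
-- 'for i in range(...): body(xs[i])' as a fold over the fetched elements
theorem pv_foldl_fetch {σ : Type} (g : σ → (Int × Int) → σ) (sw : List (Int × Int))
    (idx : List Int) (init : σ) :
    idx.foldl (fun st i => g st (PySem.List.pyGetD sw i (0, 0))) init
      = (idx.map (fun i => PySem.List.pyGetD sw i (0, 0))).foldl g init := by
  induction idx generalizing init with
  | nil => rfl
  | cons x xs ih => simp only [List.foldl_cons, List.map_cons]; exact ih _

-- length of the position array is unchanged by the initialisation loop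
theorem pv_len_init (l : List Int) (v : List Int) (p0 : List Int) :
    (l.foldl (fun pos i => PySem.List.pySetD pos (PySem.List.pyGetD v i 0) i) p0).length
      = p0.length := by
  induction l generalizing p0 with
  | nil => rfl
  | cons x xs ih => simp only [List.foldl_cons]; rw [ih, PySem.List.length_pySetD]

-- ===== VERDICT =====
theorem GFG_spec : Claim_equal_GFG := by
  intro n m values swaps _ hpre
  obtain ⟨_hinit, hcase⟩ := hpre
  show GFG n m values swaps = GFG_alt n m values swaps
  by_cases hm : m ≤ 0
  · simp only [GFG, GFG_alt]
    rw [PySem.List.pyRange_one_eq_nil hm]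
    rfl
  rcases hcase with hm0 | ⟨hn, hlen, hval, hm0, hmle, hsw⟩
  · omega
  simp only [GFG, GFG_alt, PySem.List.insert_zero]
  rw [PySem.List.foldl_add]
  rw [pv_foldl_fetch (pvA_step n) swaps, pv_foldl_fetch (pvB_step n) swaps]
  refine pv_loop_eq n _ _ _ _ _ ?_ hn ?_ rfl
  · refine ⟨by simp; omega, ?_, ?_⟩
    · rw [pv_len_init]; simp
    · intro k hk1 hk2
      rw [PySem.List.pyGetD_of_nonneg _ _ (by omega)]
      have hk : k.toNat = (k.toNat - 1) + 1 := by omega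
      rw [hk, List.getD_cons_succ]
      have hkn : k.toNat - 1 < values.length := by omega
      rw [List.getD_eq_getElem _ _ hkn]
      exact hval _ (List.getElem_mem hkn)
  · intro q hq
    rw [List.mem_map] at hq
    obtain ⟨i, hi, rfl⟩ := hq
    rw [PySem.List.mem_pyRange_one] at hi
    have hilen : i < (swaps.length : Int) := by omega
    rw [PySem.List.pyGetD_eq_getElem _ _ (by omega) hilen]
    have hit : i.toNat < m.toNat := by omega
    have hmem : swaps[i.toNat] ∈ swaps.take m.toNat := by
      have h1 : i.toNat < (swaps.take m.toNat).length := by simp; omega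
      have h2 : (swaps.take m.toNat)[i.toNat] = swaps[i.toNat] := List.getElem_take
      rw [← h2]
      exact List.getElem_mem h1
    exact hsw _ hmem
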